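-- pv_equiv track=rewrite | github.com/StericottoAlpha/C3 | analytics/views.py | _shift_month
-- ===== SOURCE A (Python) =====
-- def _shift_month(year: int, month: int, delta: int):
--     m = month + delta
--     y = year
--     while m <= 0:
--         m += 12
--         y -= 1
--     while m >= 13:
--         m -= 12
--         y += 1
--     return y, m
-- ===== SOURCE B (Python) =====
-- def _shift_month(year: int, month: int, delta: int):
--     t = month + delta - 1
--     return year + t // 12, t % 12 + 1
-- ===== Notes on version B (the rewrite author's own statement) =====
-- stated objective: faster
-- what changed: Replaced the two normalization while-loops with one closed-form floor-division/modulo step on the 0-based month.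
import Mathlib
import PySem

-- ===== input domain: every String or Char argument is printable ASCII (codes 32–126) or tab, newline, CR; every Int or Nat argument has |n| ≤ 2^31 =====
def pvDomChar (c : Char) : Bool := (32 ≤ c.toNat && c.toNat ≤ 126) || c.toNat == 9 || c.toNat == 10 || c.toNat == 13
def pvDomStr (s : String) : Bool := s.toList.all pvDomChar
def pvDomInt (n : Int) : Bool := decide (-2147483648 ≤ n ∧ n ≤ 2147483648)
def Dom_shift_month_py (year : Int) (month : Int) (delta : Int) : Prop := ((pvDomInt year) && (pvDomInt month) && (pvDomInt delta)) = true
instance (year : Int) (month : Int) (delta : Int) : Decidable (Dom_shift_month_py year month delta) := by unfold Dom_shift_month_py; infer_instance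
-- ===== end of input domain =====

-- B replaces the two month-normalization while-loops with one closed-form floor-division/modulo step (simpler).


-- ===== PORT A =====
-- while m <= 0: m += 12; y -= 1   (terminates: 1 - m decreases)
def shiftLoopUp (y : Int) (m : Int) : Int × Int :=
  if m ≤ 0 then shiftLoopUp (y - 1) (m + 12) else (y, m)
termination_by (1 - m).toNat
decreasing_by omega

-- while m >= 13: m -= 12; y += 1   (terminates: m decreases)
def shiftLoopDown (y : Int) (m : Int) : Int × Int :=
  if 13 ≤ m then shiftLoopDown (y + 1) (m - 12) else (y, m)
termination_by m.toNat
decreasing_by omega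

def shift_month_py (year : Int) (month : Int) (delta : Int) : Int × Int :=
  let p := shiftLoopUp year (month + delta)
  shiftLoopDown p.1 p.2

-- ===== PORT B =====
-- B: closed form with Python's floor division / modulo
def shift_month_py_alt (year : Int) (month : Int) (delta : Int) : Int × Int :=
  let t := month + delta - 1
  (year + PySem.Int.floordiv t 12, PySem.Int.mod t 12 + 1)

-- ===== PRECONDITION & SPEC =====
def Spec_shift_month_py (year : Int) (month : Int) (delta : Int) (out : Int × Int) : Prop := out = shift_month_py_alt year month delta
instance (year : Int) (month : Int) (delta : Int) (out : Int × Int) : Decidable (Spec_shift_month_py year month delta out) := by unfold Spec_shift_month_py; infer_instance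

-- ===== CLAIM (what is proved, stated in full; the proofs are below) =====
def Claim_equal_shift_month_py : Prop := ∀ (year : Int) (month : Int) (delta : Int), Dom_shift_month_py year month delta → Spec_shift_month_py year month delta (shift_month_py year month delta)

-- ===== LEMMAS AND PROOFS =====

-- the closed form, as a function of the loop state
def shiftF (y : Int) (m : Int) : Int × Int :=
  (y + PySem.Int.floordiv (m - 1) 12, PySem.Int.mod (m - 1) 12 + 1)

theorem shiftF_up (y m : Int) (h : m ≤ 0) : shiftF y m = shiftF (y - 1) (m + 12) := by
  unfold shiftF
  simp only [PySem.Int.floordiv_eq_ediv_of_pos (show (0:Int) < 12 by norm_num),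
    PySem.Int.mod_eq_emod_of_pos (show (0:Int) < 12 by norm_num), Prod.mk.injEq]
  omega

theorem shiftF_down (y m : Int) (h : 13 ≤ m) : shiftF y m = shiftF (y + 1) (m - 12) := by
  unfold shiftF
  simp only [PySem.Int.floordiv_eq_ediv_of_pos (show (0:Int) < 12 by norm_num),
    PySem.Int.mod_eq_emod_of_pos (show (0:Int) < 12 by norm_num), Prod.mk.injEq]
  omega

theorem shiftF_base (y m : Int) (h1 : 1 ≤ m) (h2 : m ≤ 12) : shiftF y m = (y, m) := by
  unfold shiftF
  simp only [PySem.Int.floordiv_eq_ediv_of_pos (show (0:Int) < 12 by norm_num),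
    PySem.Int.mod_eq_emod_of_pos (show (0:Int) < 12 by norm_num), Prod.mk.injEq]
  omega

theorem shiftLoopDown_spec (y m : Int) (h : 1 ≤ m) : shiftLoopDown y m = shiftF y m := by
  induction y, m using shiftLoopDown.induct with
  | case1 y m hm ih =>
    rw [shiftLoopDown, if_pos hm, ih (by omega), shiftF_down y m hm]
  | case2 y m hm =>
    rw [shiftLoopDown, if_neg hm, shiftF_base y m h (by omega)]

theorem shift_loops_spec (y m : Int) :
    shiftLoopDown (shiftLoopUp y m).1 (shiftLoopUp y m).2 = shiftF y m := by
  induction y, m using shiftLoopUp.induct with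
  | case1 y m hm ih =>
    rw [shiftLoopUp, if_pos hm, ih, shiftF_up y m hm]
  | case2 y m hm =>
    rw [shiftLoopUp, if_neg hm]
    exact shiftLoopDown_spec y m (by omega)

-- ===== VERDICT (by name: the statement is the Claim_ definition above) =====
theorem shift_month_py_spec : Claim_equal_shift_month_py := by
  intro year month delta _
  show shift_month_py year month delta = shift_month_py_alt year month delta
  unfold shift_month_py
  rw [shift_loops_spec]
  rfl
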